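-- pv_equiv track=rewrite | github.com/jeyeonkim777/Algorithm | 2021/03/메뉴_리뉴얼.py | backtrack
-- ===== SOURCE A (Python) =====
-- def backtrack(menus, r, visit, order, course):
--     flag = True
--     for x in range(len(course) - 1):
--         if course[x] > course[x+1]:
--             flag = False
--             break
--     if flag == False:
--         return
--     if len(course) == r:
--         course_str = ''.join(sorted(course))
--         if course_str in order:
--             order[course_str] += 1
--         else:
--             order[course_str] = 1
--     else:
--         for menu in range(len(menus)):
--             if visit[menu]:
--                 continue
--             visit[menu] = 1
--             course.append(menus[menu])
--             backtrack(menus, r, visit, order, course)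
--             visit[menu] = 0
--             course.pop()
--
--     return order
-- ===== SOURCE B (Python) =====
-- # B: separates enumeration from counting. A pure recursive generator produces, in
-- # the same DFS order as A, every valid value-sequence extending `course` (pruning
-- # with one comparison against the previous element instead of re-scanning the whole
-- # prefix each call); one flat loop then tallies the keys. Only `order` is mutated
-- # (same net mutation as A, which restores visit/course). Return value matches A.
--
-- def backtrack(menus, r, visit, order, course):
--     if any(b < a for a, b in zip(course, course[1:])):
--         return None
--     last = course[-1] if course else None
--     base = sorted(course)
--     avail = [m for m, v in zip(menus, visit) if not v]
--     for tail in _tails(avail, r - len(course), last):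
--         key = ''.join(sorted(base + tail))
--         order[key] = order.get(key, 0) + 1
--     return order
--
-- def _tails(avail, k, last):
--     # all length-k sequences of distinct positions of avail (as value lists),
--     # nondecreasing and starting at >= last, in index-DFS order
--     if k <= 0:
--         return [[]] if k == 0 else []
--     out = []
--     for i in range(len(avail)):
--         m = avail[i]
--         if last is None or last <= m:
--             for t in _tails(avail[:i] + avail[i + 1:], k - 1, m):
--                 out.append([m] + t)
--     return out
-- ===== Notes on version B (the rewrite author's own statement) =====
-- stated objective: alternative
-- what changed: Replaces A's state-mutating DFS (visit flags flipped in place, course grown/shrunk, full prefix re-sorted-checked on every recursive call) by a pure recursive generator of the valid extension sequences (pruning with a single comparison against the previous element) followed by one flat counting loop over the generated keys.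
import Mathlib
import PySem

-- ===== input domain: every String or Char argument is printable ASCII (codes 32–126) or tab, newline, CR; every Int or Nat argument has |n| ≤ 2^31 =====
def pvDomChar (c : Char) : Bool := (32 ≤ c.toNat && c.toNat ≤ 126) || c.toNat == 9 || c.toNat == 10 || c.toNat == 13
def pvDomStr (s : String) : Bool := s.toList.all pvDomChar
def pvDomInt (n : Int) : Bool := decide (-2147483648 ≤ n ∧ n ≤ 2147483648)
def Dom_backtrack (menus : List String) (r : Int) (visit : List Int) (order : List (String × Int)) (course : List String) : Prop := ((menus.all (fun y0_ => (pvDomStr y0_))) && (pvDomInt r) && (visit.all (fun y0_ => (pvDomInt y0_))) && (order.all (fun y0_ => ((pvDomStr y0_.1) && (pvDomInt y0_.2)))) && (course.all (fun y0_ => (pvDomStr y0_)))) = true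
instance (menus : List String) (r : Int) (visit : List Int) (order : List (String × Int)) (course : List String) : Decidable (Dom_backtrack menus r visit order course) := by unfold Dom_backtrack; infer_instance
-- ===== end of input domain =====

-- B replaces A's state-mutating DFS by a pure recursive generator of the valid
-- extension sequences plus one flat counting loop (return value only: A mutates
-- `order` in place and restores visit/course; B mutates only `order`).

-- ===== PORT A =====

-- A's flag loop over x in range(len(course)-1): adjacent scan, early break = first failure
def pvScanA : List String → Bool
  | a :: b :: t => if b < a then false else pvScanA (b :: t)   -- Python course[x] > course[x+1]
  | _ => true

-- number of indices j < i with visit[j] == 0 (termination measure for the DFS: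
-- marking an unvisited menu visited strictly decreases it)
def pvUnvis : List Int → Nat → Nat
  | _, 0 => 0
  | [], _ + 1 => 0
  | v :: vs, i + 1 => (if v = 0 then 1 else 0) + pvUnvis vs i

theorem pvUnvis_set_lt (vs : List Int) (j : Nat) (n : Nat) (hjn : j < n)
    (hget : PySem.List.pyGet? vs (j : Int) = some 0) :
    pvUnvis (vs.set j 1) n < pvUnvis vs n := by
  rw [PySem.List.pyGet?_natCast] at hget
  induction vs generalizing j n with
  | nil => simp at hget
  | cons v vs ih =>
    cases n with
    | zero => omega
    | succ n =>
      cases j with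
      | zero =>
        simp_all [List.set, pvUnvis]
      | succ j =>
        simp only [List.set, pvUnvis, List.getElem?_cons_succ] at *
        have := ih j n (by omega) hget
        omega

-- the recursive body of A (order threaded functionally; visit/course are restored
-- by A, so each loop iteration sees the caller's visit/course unchanged)
def goA (menus : List String) (r : Int) (visit : List Int)
    (order : PySem.Dict String Int) (course : List String) : PySem.Dict String Int :=
  if pvScanA course = false then order        -- flag == False: return (None); mutation stops
  else if PySem.List.len course = r then
    let courseStr := PySem.Str.join "" (PySem.List.sorted course (fun s => s) false)
    match order.get? courseStr with
    | some v => order.insert courseStr (v + 1)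
    | none => order.insert courseStr 1
  else
    (List.range menus.length).attach.foldl (fun ord mi =>
      match _h : PySem.List.pyGet? visit (mi.1 : Int) with
      | none => ord                            -- IndexError (outside Pre_)
      | some v =>
        if _hv : v = 0 then
          goA menus r (visit.set mi.1 1) ord (course ++ [PySem.List.pyGetD menus (mi.1 : Int) ""])
        else ord) order                        -- if visit[menu]: continue
termination_by pvUnvis visit menus.length
decreasing_by
  exact pvUnvis_set_lt visit mi.1 menus.length (List.mem_range.mp mi.2) (_hv ▸ _h)

def backtrack (menus : List String) (r : Int) (visit : List Int)
    (order : List (String × Int)) (course : List String) : Option (List (String × Int)) :=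
  if pvScanA course = false then none
  else some (goA menus r visit (PySem.Dict.mk order) course).items

-- ===== PORT B =====

-- _tails(avail, k, last): length-k nondecreasing sequences of distinct positions
-- of avail (as value lists), first element >= last, in index-DFS order
def tailsB (avail : List String) (k : Int) (last : Option String) : List (List String) :=
  if k ≤ 0 then (if k = 0 then [[]] else [])
  else
    (List.range avail.length).attach.foldl (fun out i =>
      let m := PySem.List.pyGetD avail (i.1 : Int) ""
      if (match last with | none => true | some l => decide (l ≤ m)) then
        -- avail[:i] + avail[i+1:]
        out ++ (tailsB (avail.take i.1 ++ avail.drop (i.1 + 1)) (k - 1) (some m)).map (fun t => m :: t)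
      else out) []
termination_by avail.length
decreasing_by
  have hi : i.1 < avail.length := List.mem_range.mp i.2
  simp only [List.length_append, List.length_take, List.length_drop]
  omega

def backtrack_alt (menus : List String) (r : Int) (visit : List Int)
    (order : List (String × Int)) (course : List String) : Option (List (String × Int)) :=
  if (List.zip course (course.drop 1)).any (fun p => decide (p.2 < p.1)) then none   -- any(b < a for a, b in zip(course, course[1:]))
  else
    let last : Option String := if course.isEmpty then none else some (PySem.List.pyGetD course (-1) "")
    let base := PySem.List.sorted course (fun s => s) false
    let avail := ((List.zip menus visit).filter (fun p => p.2 == 0)).map Prod.fst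
    let d := (tailsB avail (r - PySem.List.len course) last).foldl (fun d t =>
      let key := PySem.Str.join "" (PySem.List.sorted (base ++ t) (fun s => s) false)
      d.insert key (d.getD key 0 + 1)) (PySem.Dict.mk order)
    some d.items

-- ===== PRECONDITION & SPEC =====
-- closed-form "course is nondecreasing" used by Pre_
def pvNondec (course : List String) : Bool :=
  (List.zip course (course.drop 1)).all (fun p => decide (p.1 ≤ p.2))

-- Pre_ excludes exactly the inputs where A raises IndexError: visit shorter than
-- menus while the recursion is entered (course nondecreasing and len(course) != r).
def Pre_backtrack (menus : List String) (r : Int) (visit : List Int) (order : List (String × Int)) (course : List String) : Prop :=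
  menus.length ≤ visit.length ∨ r = (course.length : Int) ∨ pvNondec course = false
instance (menus : List String) (r : Int) (visit : List Int) (order : List (String × Int)) (course : List String) : Decidable (Pre_backtrack menus r visit order course) := by unfold Pre_backtrack; infer_instance

def pvWitness_backtrack : List String × Int × List Int × (List (String × Int)) × List String :=
  (["b", "a", "c"], 2, [0, 0, 0], [], [])

def Spec_backtrack (menus : List String) (r : Int) (visit : List Int) (order : List (String × Int)) (course : List String) (out : Option (List (String × Int))) : Prop := out = backtrack_alt menus r visit order course
instance (menus : List String) (r : Int) (visit : List Int) (order : List (String × Int)) (course : List String) (out : Option (List (String × Int))) : Decidable (Spec_backtrack menus r visit order course out) := by unfold Spec_backtrack; infer_instance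

-- ===== CLAIM (what is proved, stated in full; the proofs are below) =====
def Claim_equal_backtrack : Prop := ∀ (menus : List String) (r : Int) (visit : List Int) (order : List (String × Int)) (course : List String), Dom_backtrack menus r visit order course → Pre_backtrack menus r visit order course → Spec_backtrack menus r visit order course (backtrack menus r visit order course)
-- ===== LEMMAS AND PROOFS =====

-- proof-side abbreviations
def incrD (d : PySem.Dict String Int) (k : String) : PySem.Dict String Int :=
  d.insert k (d.getD k 0 + 1)
def keyOf (c : List String) : String :=
  PySem.Str.join "" (PySem.List.sorted c (fun s => s) false)
def okL : Option String → String → Bool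
  | none, _ => true
  | some l, m => decide (l ≤ m)
-- the unvisited menus in index order (structural form of B's avail)
def availP : List String → List Int → List String
  | [], _ => []
  | _ :: _, [] => []
  | m :: ms, v :: vs => if v = 0 then m :: availP ms vs else availP ms vs

theorem incrA_eq (d : PySem.Dict String Int) (k : String) :
    (match d.get? k with
     | some v => d.insert k (v + 1)
     | none => d.insert k 1) = incrD d k := by
  unfold incrD PySem.Dict.getD
  cases h : d.get? k <;> simp [h]

theorem availB_eq (menus : List String) (visit : List Int) :
    ((List.zip menus visit).filter (fun p => p.2 == 0)).map Prod.fst = availP menus visit := by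
  induction menus generalizing visit with
  | nil => simp [availP]
  | cons m ms ih =>
    cases visit with
    | nil => simp [availP]
    | cons v vs =>
      by_cases hv : v = 0 <;> simp [availP, hv, List.filter, ih]

theorem scanA_concat (course : List String) (m : String) :
    pvScanA (course ++ [m]) = (pvScanA course && okL course.getLast? m) := by
  induction course with
  | nil => simp [pvScanA, okL]
  | cons a t ih =>
    cases t with
    | nil =>
      simp only [pvScanA, okL, List.nil_append, List.cons_append, List.getLast?_singleton]
      by_cases h : m < a
      · simp [pvScanA, h, not_le.mpr h]
      · simp [pvScanA, h, not_lt.mp h]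
    | cons b t' =>
      simp only [List.cons_append, pvScanA] at *
      by_cases h : b < a
      · simp [h]
      · simpa [h, List.getLast?_cons_cons] using ih

theorem zipany_eq (c : List String) :
    (List.zip c (c.drop 1)).any (fun p => decide (p.2 < p.1)) = !pvScanA c := by
  induction c with
  | nil => simp [pvScanA]
  | cons a t ih =>
    cases t with
    | nil => simp [pvScanA]
    | cons b t' =>
      simp only [List.drop_succ_cons, List.drop_zero, List.zip_cons_cons, List.any_cons, pvScanA] at *
      by_cases h : b < a
      · simp [h]
      · rw [if_neg h, decide_eq_false h, Bool.false_or, ih]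

theorem nondec_eq_scan (c : List String) : pvNondec c = pvScanA c := by
  unfold pvNondec
  induction c with
  | nil => simp [pvScanA]
  | cons a t ih =>
    cases t with
    | nil => simp [pvScanA]
    | cons b t' =>
      simp only [List.drop_succ_cons, List.drop_zero, List.zip_cons_cons, List.all_cons, pvScanA] at *
      by_cases h : b < a
      · simp [h, not_le.mpr h]
      · rw [if_neg h, decide_eq_true (not_lt.mp h), Bool.true_and, ih]

theorem lastB_eq (c : List String) :
    (if c.isEmpty then none else some (PySem.List.pyGetD c (-1) "")) = c.getLast? := by
  cases c with
  | nil => simp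
  | cons a t =>
    rw [List.getLast?_eq_getElem?]
    simp [PySem.List.pyGetD, PySem.List.pyGet?, PySem.List.pyIdx?]

-- pvUnvis bookkeeping
theorem pvUnvis_succ (vs : List Int) (i : Nat) (hi : i < vs.length) :
    pvUnvis vs (i + 1) = pvUnvis vs i + (if vs[i] = 0 then 1 else 0) := by
  induction vs generalizing i with
  | nil => simp at hi
  | cons v t ih =>
    cases i with
    | zero => simp [pvUnvis]
    | succ j =>
      simp only [pvUnvis, List.getElem_cons_succ]
      have hj : j < t.length := by simpa using hi
      rw [ih j hj]
      by_cases ht : t[j]'hj = 0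
      · rw [if_pos ht, if_pos ht]; omega
      · rw [if_neg ht, if_neg ht]; omega

theorem pvUnvis_len (ms : List String) (vs : List Int) (h : ms.length ≤ vs.length) :
    pvUnvis vs ms.length = (availP ms vs).length := by
  induction ms generalizing vs with
  | nil => simp [pvUnvis, availP]
  | cons m ms ih =>
    cases vs with
    | nil => simp at h
    | cons v t =>
      by_cases hv : v = 0 <;>
        simp [pvUnvis, availP, hv, ih t (by simpa using h)] <;> omega

theorem availP_set (ms : List String) (vs : List Int) (i : Nat)
    (hi : i < ms.length) (hlen : ms.length ≤ vs.length) (hv : vs[i]? = some 0) :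
    availP ms (vs.set i 1) =
      (availP ms vs).take (pvUnvis vs i) ++ (availP ms vs).drop (pvUnvis vs i + 1) := by
  induction ms generalizing vs i with
  | nil => simp at hi
  | cons m ms ih =>
    cases vs with
    | nil => simp at hlen
    | cons v t =>
      cases i with
      | zero =>
        simp only [List.getElem?_cons_zero, Option.some_inj] at hv
        simp [availP, pvUnvis, hv]
      | succ i =>
        simp only [List.getElem?_cons_succ] at hv
        have ih' := ih t i (by simpa using hi) (by simpa using hlen) hv
        have hc : (1 : Nat) + pvUnvis t i = pvUnvis t i + 1 := Nat.add_comm _ _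
        by_cases hv0 : v = 0
        · simp [List.set, availP, pvUnvis, hv0, ih', hc]
        · simp [List.set, availP, pvUnvis, hv0, ih']

theorem availP_get (ms : List String) (vs : List Int) (i : Nat)
    (hi : i < ms.length) (hlen : ms.length ≤ vs.length) (hv : vs[i]? = some 0) :
    (availP ms vs)[pvUnvis vs i]? = ms[i]? := by
  induction ms generalizing vs i with
  | nil => simp at hi
  | cons m ms ih =>
    cases vs with
    | nil => simp at hlen
    | cons v t =>
      cases i with
      | zero =>
        simp only [List.getElem?_cons_zero, Option.some_inj] at hv
        simp [availP, pvUnvis, hv]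
      | succ i =>
        simp only [List.getElem?_cons_succ] at hv
        have ih' := ih t i (by simpa using hi) (by simpa using hlen) hv
        have hc : (1 : Nat) + pvUnvis t i = pvUnvis t i + 1 := Nat.add_comm _ _
        by_cases hv0 : v = 0
        · simp [availP, pvUnvis, hv0, hc, ih']
        · simp [availP, pvUnvis, hv0, ih']

-- per-position chunk of tailsB's loop
def chunkT (U : List String) (k : Int) (last : Option String) (i : Nat) : List (List String) :=
  let m := PySem.List.pyGetD U (i : Int) ""
  if okL last m then (tailsB (U.take i ++ U.drop (i + 1)) (k - 1) (some m)).map (fun t => m :: t)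
  else []

theorem tailsB_nonpos (U : List String) (k : Int) (last : Option String) (hk : k ≤ 0) :
    tailsB U k last = if k = 0 then [[]] else [] := by
  rw [tailsB]; simp [hk]

theorem tailsB_flat (U : List String) (k : Int) (last : Option String) (hk : 0 < k) :
    tailsB U k last = (List.range U.length).flatMap (chunkT U k last) := by
  rw [tailsB]
  rw [if_neg (by omega : ¬ k ≤ 0)]
  rw [PySem.List.foldl_congr_mem
    (g := fun (out : List (List String)) (i : {x // x ∈ List.range U.length}) => out ++ chunkT U k last i.1)
    (h := by
      intro acc i _
      show (if (match last with | none => true | some l => decide (l ≤ PySem.List.pyGetD U (↑i.1 : Int) "")) = true then _ else _) = _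
      unfold chunkT okL
      cases last <;> dsimp only [] <;> split <;> simp)]
  rw [List.foldl_attach (f := fun (out : List (List String)) (j : Nat) => out ++ chunkT U k last j)]
  rw [PySem.List.foldl_append_eq_flatMap]
  simp

-- ==== the main correspondence ====

theorem pvUnvis_mono (vs : List Int) (i j : Nat) (h : i ≤ j) : pvUnvis vs i ≤ pvUnvis vs j := by
  induction vs generalizing i j with
  | nil => cases i <;> cases j <;> simp [pvUnvis]
  | cons v t ih =>
    cases i with
    | zero => cases j <;> simp [pvUnvis]
    | succ i =>
      cases j with
      | zero => omega
      | succ j => simp only [pvUnvis]; have := ih i j (by omega); omega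

theorem chunkT_neg (U : List String) (k : Int) (last : Option String) (i : Nat) (hk : k < 0) :
    chunkT U k last i = [] := by
  show (if okL last (PySem.List.pyGetD U (i : Int) "") = true then
      (tailsB (U.take i ++ U.drop (i + 1)) (k - 1) (some (PySem.List.pyGetD U (i : Int) ""))).map
        (fun t => PySem.List.pyGetD U (i : Int) "" :: t)
    else []) = []
  rw [tailsB_nonpos _ _ _ (by omega), if_neg (by omega : ¬ k - 1 = 0)]
  split <;> simp

-- unfolding of goA's loop branch to a plain fold over the index range
theorem goA_else (menus : List String) (r : Int) (visit : List Int)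
    (d : PySem.Dict String Int) (course : List String)
    (hs : pvScanA course = true) (hr : ¬ PySem.List.len course = r) :
    goA menus r visit d course =
      (List.range menus.length).foldl (fun ord (j : Nat) =>
        match PySem.List.pyGet? visit (↑j : Int) with
        | none => ord
        | some v =>
          if v = 0 then
            goA menus r (visit.set j 1) ord (course ++ [PySem.List.pyGetD menus (↑j : Int) ""])
          else ord) d := by
  conv_lhs => rw [goA]
  rw [if_neg (by simp [hs]), if_neg hr]
  conv_rhs => rw [← List.attach_map_subtype_val (l := List.range menus.length), List.foldl_map]
  apply PySem.List.foldl_congr_mem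
  intro acc mi _
  cases hh : PySem.List.pyGet? visit ((mi : Nat) : Int) with
  | none => simp [hh]
  | some v => by_cases hv : v = 0 <;> simp [hh, hv]

theorem goA_eq (menus : List String) (r : Int) :
    ∀ (N : Nat) (visit : List Int) (course : List String) (d : PySem.Dict String Int),
      pvUnvis visit menus.length = N →
      menus.length ≤ visit.length →
      pvScanA course = true →
      goA menus r visit d course =
        (tailsB (availP menus visit) (r - course.length) course.getLast?).foldl
          (fun d t => incrD d (keyOf (course ++ t))) d := by
  intro N
  induction N using Nat.strong_induction_on with
  | _ N IH =>
  intro visit course d hN hlen hs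
  by_cases hr : PySem.List.len course = r
  · -- len(course) == r: count once
    rw [goA]
    rw [if_neg (by simp [hs]), if_pos hr]
    rw [PySem.List.len_eq] at hr
    rw [← hr, sub_self, tailsB_nonpos _ _ _ le_rfl, if_pos rfl]
    simp only [List.foldl_cons, List.foldl_nil, List.append_nil]
    exact incrA_eq d (keyOf course)
  · -- recursion case
    set n := menus.length with hn
    set U := availP menus visit with hU
    set k := r - (course.length : Int) with hk
    set F : PySem.Dict String Int → List String → PySem.Dict String Int :=
      fun d t => incrD d (keyOf (course ++ t)) with hF
    have hUlen : pvUnvis visit n = U.length := pvUnvis_len menus visit hlen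
    have inner : ∀ (t i : Nat) (d : PySem.Dict String Int), i ≤ n → n - i = t →
        (List.range' i (n - i)).foldl (fun ord (j : Nat) =>
          match PySem.List.pyGet? visit (↑j : Int) with
          | none => ord
          | some v =>
            if v = 0 then
              goA menus r (visit.set j 1) ord (course ++ [PySem.List.pyGetD menus (↑j : Int) ""])
            else ord) d
        = ((List.range' (pvUnvis visit i) (U.length - pvUnvis visit i)).flatMap
            (chunkT U k course.getLast?)).foldl F d := by
      intro t
      induction t with
      | zero =>
        intro i d hi ht
        have hin : i = n := by omega
        subst hin
        rw [hUlen]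
        simp [ht]
      | succ t ihs =>
        intro i d hi ht
        have hilt : i < n := by omega
        have hivis : i < visit.length := by omega
        have hget : PySem.List.pyGet? visit (i : Int) = some (visit[i]'hivis) := by
          rw [PySem.List.pyGet?_natCast, List.getElem?_eq_getElem hivis]
        have hme : PySem.List.pyGetD menus (i : Int) "" = menus[i]'hilt := by
          simp [PySem.List.pyGetD, PySem.List.pyGet?_natCast, List.getElem?_eq_getElem hilt]
        rw [ht, List.range'_succ, List.foldl_cons]
        have hrest : List.range' (i + 1) t = List.range' (i + 1) (n - (i + 1)) := by
          congr 1; omega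
        by_cases hv : visit[i]'hivis = 0
        · -- unvisited index
          have hgv : visit[i]? = some 0 := by rw [List.getElem?_eq_getElem hivis, hv]
          have hlt : pvUnvis visit i < U.length := by
            have h1 := pvUnvis_succ visit i hivis
            have h2 := pvUnvis_mono visit (i + 1) n (by omega)
            rw [hv] at h1
            simp at h1
            omega
          have hsucc : pvUnvis visit (i + 1) = pvUnvis visit i + 1 := by
            have h1 := pvUnvis_succ visit i hivis
            rw [hv] at h1
            simpa using h1
          have hstep : (List.range' (pvUnvis visit i) (U.length - pvUnvis visit i)).flatMap
              (chunkT U k course.getLast?)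
              = chunkT U k course.getLast? (pvUnvis visit i)
                ++ (List.range' (pvUnvis visit i + 1) (U.length - (pvUnvis visit i + 1))).flatMap
                    (chunkT U k course.getLast?) := by
            rw [show U.length - pvUnvis visit i = (U.length - (pvUnvis visit i + 1)) + 1 by omega,
              List.range'_succ, List.flatMap_cons]
          have hUget : PySem.List.pyGetD U ((pvUnvis visit i : Nat) : Int) "" = menus[i]'hilt := by
            have := availP_get menus visit i hilt hlen hgv
            rw [← hU] at this
            simp [PySem.List.pyGetD, PySem.List.pyGet?_natCast, this,
              List.getElem?_eq_getElem hilt]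
          -- the A-side step for this index
          rw [hget]
          simp only [hv, if_pos rfl]
          by_cases hok : okL course.getLast? (menus[i]'hilt) = true
          · -- extension survives the child's sorted check
            have hscan : pvScanA (course ++ [menus[i]'hilt]) = true := by
              rw [scanA_concat, hs, hok, Bool.and_self]
            have hNlt : pvUnvis (visit.set i 1) n < N := by
              rw [← hN]
              exact pvUnvis_set_lt visit i n hilt (by rw [hget, hv])
            have hchild := IH _ hNlt (visit.set i 1) (course ++ [menus[i]'hilt]) d rfl
              (by simpa using hlen) hscan
            rw [hme, hchild]
            have hset := availP_set menus visit i hilt hlen hgv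
            rw [← hU] at hset
            have hklen : r - (((course ++ [menus[i]'hilt]).length : Nat) : Int) = k - 1 := by
              simp [hk]; push_cast; ring
            rw [hset, hklen, List.getLast?_concat]
            have hkey : (fun (d : PySem.Dict String Int) (t : List String) =>
                incrD d (keyOf ((course ++ [menus[i]'hilt]) ++ t)))
                = fun d t => F d (menus[i]'hilt :: t) := by
              funext d t
              rw [List.append_assoc, List.singleton_append]
            rw [hkey, ← List.foldl_map (f := fun t => menus[i]'hilt :: t)]
            have hchunk : chunkT U k course.getLast? (pvUnvis visit i)
                = (tailsB (U.take (pvUnvis visit i) ++ U.drop (pvUnvis visit i + 1)) (k - 1)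
                    (some (menus[i]'hilt))).map (fun t => menus[i]'hilt :: t) := by
              unfold chunkT
              rw [hUget]
              rw [if_pos (by rw [hok])]
            rw [hstep, List.foldl_append, ← hchunk]
            rw [hrest, ihs (i + 1) _ (by omega) (by omega), hsucc]
            simp
          · -- extension pruned by the child's sorted check
            have hscan : pvScanA (course ++ [menus[i]'hilt]) = false := by
              rw [scanA_concat, hs]
              simp only [Bool.true_and]
              exact (Bool.not_eq_true _).mp hok
            have hchild : goA menus r (visit.set i 1) d (course ++ [menus[i]'hilt]) = d := by
              rw [goA, if_pos hscan]
            rw [hme, hchild]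
            have hchunk : chunkT U k course.getLast? (pvUnvis visit i) = [] := by
              unfold chunkT
              rw [hUget]
              rw [if_neg hok]
            rw [hstep, hchunk, List.nil_append]
            rw [hrest, ihs (i + 1) _ (by omega) (by omega), hsucc]
            simp
        · -- visited index: skipped, count unchanged
          have hsucc : pvUnvis visit (i + 1) = pvUnvis visit i := by
            have h1 := pvUnvis_succ visit i hivis
            rw [if_neg hv] at h1
            omega
          rw [hget]
          simp only [hv, if_neg hv]
          rw [hrest, ihs (i + 1) _ (by omega) (by omega), hsucc]
          simp
    have hmain := inner (n - 0) 0 d (by omega) rfl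
    rw [Nat.sub_zero] at hmain
    rw [← List.range_eq_range'] at hmain
    rw [goA_else menus r visit d course hs hr, hmain]
    show _ = (tailsB U k course.getLast?).foldl F d
    simp only [pvUnvis, Nat.sub_zero]
    by_cases hkpos : 0 < k
    · rw [tailsB_flat U k course.getLast? hkpos, ← List.range_eq_range']
    · have hkneg : k < 0 := by
        rw [PySem.List.len_eq] at hr
        simp only [hk]
        omega
      rw [tailsB_nonpos _ _ _ (by omega), if_neg (by omega)]
      have hz : ∀ j, chunkT U k course.getLast? j = [] := fun j => chunkT_neg U k course.getLast? j hkneg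
      rw [List.flatMap_eq_foldl]
      rw [PySem.List.foldl_congr_mem (g := fun (acc : List (List String)) (_ : Nat) => acc)
        (h := fun acc j _ => by rw [hz j, List.append_nil])]
      have hid : ∀ (l : List Nat) (acc : List (List String)), l.foldl (fun acc _ => acc) acc = acc := by
        intro l
        induction l with
        | nil => intro acc; rfl
        | cons x t ih => intro acc; exact ih acc
      rw [hid]

-- B's key equals the structural key
theorem keyB_eq (course t : List String) :
    PySem.Str.join "" (PySem.List.sorted ((PySem.List.sorted course (fun s => s) false) ++ t) (fun s => s) false)
      = keyOf (course ++ t) := by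
  unfold keyOf
  congr 1
  exact PySem.List.sorted_eq_sorted_of_perm _ _ _ (fun a b h => h)
    ((PySem.List.sorted_perm course (fun s => s) false).append_right t)

-- ===== VERDICT (by name: the statement is the Claim_ definition above) =====
theorem backtrack_spec : Claim_equal_backtrack := by
  intro menus r visit order course _ hpre
  unfold Spec_backtrack backtrack backtrack_alt
  rw [zipany_eq]
  by_cases hs : pvScanA course = true
  · simp only [hs, Bool.not_true, Bool.false_eq_true, if_false, Bool.true_eq_false]
    rw [lastB_eq]
    simp only [availB_eq, PySem.List.len_eq]
    have hkey : (fun (d : PySem.Dict String Int) (t : List String) =>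
        d.insert (PySem.Str.join "" (PySem.List.sorted ((PySem.List.sorted course (fun s => s) false) ++ t) (fun s => s) false))
          (d.getD (PySem.Str.join "" (PySem.List.sorted ((PySem.List.sorted course (fun s => s) false) ++ t) (fun s => s) false)) 0 + 1))
        = (fun d t => incrD d (keyOf (course ++ t))) := by
      funext d t; rw [keyB_eq]; rfl
    rcases hpre with hlen | hr | hbad
    · rw [goA_eq menus r _ visit course _ rfl hlen hs, hkey]
    · -- len(course) == r: both sides count course once, without touching visit
      rw [goA]
      rw [if_neg (by simp [hs] : ¬ pvScanA course = false)]
      rw [if_pos (by rw [PySem.List.len_eq, ← hr] : PySem.List.len course = r)]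
      rw [← hr]
      simp only [sub_self]
      rw [tailsB_nonpos _ _ _ le_rfl, if_pos rfl]
      simp only [List.foldl_cons, List.foldl_nil]
      rw [incrA_eq]
      unfold incrD
      rw [keyB_eq]
      simp [keyOf]
    · rw [nondec_eq_scan, hs] at hbad; cases hbad
  · simp only [Bool.not_eq_true] at hs
    simp [hs]
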